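-- pv_equiv track=rewrite | github.com/floating-reeds/geeeplan | main.py | adj_checker
-- ===== SOURCE A (Python) =====
-- def adj_checker(grid, row, col, adj, block, block_id, len_blocks):
--     ab = set(range(1, len_blocks+1))
--     inverted_adj = [x for x in ab if x not in adj]
--     inverted_adj = [x for x in inverted_adj if x <= block_id]
--
--     directions = [(0, 1), (1, 0), (0, -1), (-1, 0)]
--     for i in range(len(block)):
--         for j in range(len(block[0])):
--             if block[i][j] == 1:
--                 for rd, cd in directions:
--                     if 0 <= row + i + rd < len(grid) and 0 <= col + j + cd < len(grid[0]) and grid[row + i + rd][col + j + cd] in adj and grid[row + i + rd][col + j + cd] not in inverted_adj: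
--                         return False
--
--     return True
-- ===== SOURCE B (Python) =====
-- def adj_checker(grid, row, col, adj, block, block_id, len_blocks):
--     # Inverted traversal: scan the GRID for forbidden values and ask whether any
--     # such cell is the 4-neighbour of a filled cell of the placed block
--     # (A scans the block and probes the grid; the dead inverted_adj filter is dropped).
--     forbidden = set(adj)
--     br = len(block)
--     bc = len(block[0]) if block else 0
--     cols = len(grid[0]) if grid else 0
--     for r, grow in enumerate(grid):
--         for c, v in enumerate(grow[:cols]):
--             if v in forbidden:
--                 for rd, cd in ((0, 1), (1, 0), (0, -1), (-1, 0)):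
--                     i, j = r - row - rd, c - col - cd
--                     if 0 <= i < br and 0 <= j < bc and block[i][j] == 1:
--                         return False
--     return True
-- ===== Notes on version B (the rewrite author's own statement) =====
-- stated objective: faster
-- what changed: B inverts the traversal: instead of scanning the block's filled cells and probing the grid around them (with the dead inverted_adj filter), B scans the grid for cells whose value is forbidden and asks whether such a cell is a 4-neighbour of a filled cell of the placed block, using a hash set for the membership test.
-- outside the precondition, e.g. on adj_checker([[5, 9], [7]], 0, 0, [9], [[1, 1]], 1, 1): A returns False, B returns False
import Mathlib
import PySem

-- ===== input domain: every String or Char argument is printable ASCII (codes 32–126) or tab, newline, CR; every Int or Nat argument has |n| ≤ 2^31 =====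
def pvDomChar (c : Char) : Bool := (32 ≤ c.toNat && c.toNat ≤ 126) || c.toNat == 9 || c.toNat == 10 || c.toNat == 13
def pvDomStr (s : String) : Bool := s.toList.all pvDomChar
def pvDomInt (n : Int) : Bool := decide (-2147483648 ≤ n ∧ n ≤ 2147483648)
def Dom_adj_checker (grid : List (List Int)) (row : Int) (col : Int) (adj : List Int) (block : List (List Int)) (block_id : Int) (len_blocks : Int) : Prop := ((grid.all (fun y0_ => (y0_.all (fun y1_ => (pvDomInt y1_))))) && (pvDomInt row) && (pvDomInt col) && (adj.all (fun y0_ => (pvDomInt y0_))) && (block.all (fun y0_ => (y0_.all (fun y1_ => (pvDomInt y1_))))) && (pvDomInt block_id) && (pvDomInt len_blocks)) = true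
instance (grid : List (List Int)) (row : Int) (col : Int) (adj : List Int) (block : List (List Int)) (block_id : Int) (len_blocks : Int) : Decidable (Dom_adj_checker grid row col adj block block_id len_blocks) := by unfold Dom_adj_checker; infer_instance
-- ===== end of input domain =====

-- B inverts the traversal: it scans the grid for forbidden values and asks whether one is a
-- 4-neighbour of a filled block cell, dropping A's dead inverted_adj filter (objective: alternative).

-- ===== PORT A =====
-- The two set/list comprehensions over `ab` are ported as filters in construction order;
-- `inverted_adj` is only ever used for membership tests, so Python's hash iteration order is immaterial.
def adj_checker (grid : List (List Int)) (row : Int) (col : Int) (adj : List Int) (block : List (List Int)) (block_id : Int) (len_blocks : Int) : Bool :=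
  let ab : PySem.Set Int := PySem.Set.ofList (PySem.List.pyRange 1 (len_blocks + 1) 1)
  let inverted_adj := ab.filter (fun x => !(adj.contains x))
  let inverted_adj := inverted_adj.filter (fun x => decide (x ≤ block_id))
  let directions : List (Int × Int) := [(0, 1), (1, 0), (0, -1), (-1, 0)]
  -- for-loops with an early `return False` become a negated `any`
  !((List.range block.length).any (fun i =>
      (List.range ((block.headD []).length)).any (fun j =>
        if PySem.List.pyGetD (PySem.List.pyGetD block (i : Int) []) (j : Int) 0 == 1 then
          directions.any (fun d =>
            let v := PySem.List.pyGetD (PySem.List.pyGetD grid (row + i + d.1) []) (col + j + d.2) 0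
            decide (0 ≤ row + (i : Int) + d.1) && decide (row + (i : Int) + d.1 < (grid.length : Int)) &&
            decide (0 ≤ col + (j : Int) + d.2) && decide (col + (j : Int) + d.2 < ((grid.headD []).length : Int)) &&
            adj.contains v && !(inverted_adj.contains v))
        else false)))

-- ===== PORT B =====
def adj_checker_alt (grid : List (List Int)) (row : Int) (col : Int) (adj : List Int) (block : List (List Int)) (block_id : Int) (len_blocks : Int) : Bool :=
  let forbidden : PySem.Set Int := PySem.Set.ofList adj
  let br : Int := (block.length : Int)
  let bc : Int := ((block.headD []).length : Int)     -- len(block[0]) if block else 0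
  let cols : Int := ((grid.headD []).length : Int)    -- len(grid[0]) if grid else 0
  -- for-loops with early `return False` become a negated `any` over enumerate / the sliced row
  !((PySem.List.enumerate grid).any (fun rp =>
      (PySem.List.enumerate (PySem.List.slice rp.2 none (some cols))).any (fun cp =>
        forbidden.contains cp.2 &&
        ([((0 : Int), (1 : Int)), (1, 0), (0, -1), (-1, 0)] : List (Int × Int)).any (fun d =>
          let i := rp.1 - row - d.1
          let j := cp.1 - col - d.2
          decide (0 ≤ i ∧ i < br ∧ 0 ≤ j ∧ j < bc) &&
          (PySem.List.pyGetD (PySem.List.pyGetD block i []) j 0 == 1)))))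

-- ===== PRECONDITION & SPEC =====
-- Pre_ excludes inputs on which A's scan reaches a missing cell of a ragged block or grid
-- row: there B's own scan never raises but A raises IndexError, except when an early
-- `return False` happens to precede the out-of-range access (an artefact of A's scan order).
def Pre_adj_checker (grid : List (List Int)) (row : Int) (col : Int) (adj : List Int) (block : List (List Int)) (block_id : Int) (len_blocks : Int) : Prop :=
  (∀ r ∈ block, (block.headD []).length ≤ r.length) ∧
  ((List.range block.length).all (fun i =>
    (List.range ((block.headD []).length)).all (fun j =>
      !((block.getD i []).getD j 0 == 1) ||
      (([((0 : Int), (1 : Int)), (1, 0), (0, -1), (-1, 0)] : List (Int × Int)).all (fun d =>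
        !(decide (0 ≤ row + (i : Int) + d.1) && decide (row + (i : Int) + d.1 < (grid.length : Int)) &&
          decide (0 ≤ col + (j : Int) + d.2) && decide (col + (j : Int) + d.2 < ((grid.headD []).length : Int))) ||
        decide (col + (j : Int) + d.2 < ((grid.getD (row + (i : Int) + d.1).toNat []).length : Int)))))) = true)
instance (grid : List (List Int)) (row : Int) (col : Int) (adj : List Int) (block : List (List Int)) (block_id : Int) (len_blocks : Int) : Decidable (Pre_adj_checker grid row col adj block block_id len_blocks) := by unfold Pre_adj_checker; infer_instance

def pvWitness_adj_checker : List (List Int) × Int × Int × List Int × List (List Int) × Int × Int :=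
  ([[1, 2], [3, 4]], 0, 0, [2], [[1]], 1, 2)

def Spec_adj_checker (grid : List (List Int)) (row : Int) (col : Int) (adj : List Int) (block : List (List Int)) (block_id : Int) (len_blocks : Int) (out : Bool) : Prop := out = adj_checker_alt grid row col adj block block_id len_blocks
instance (grid : List (List Int)) (row : Int) (col : Int) (adj : List Int) (block : List (List Int)) (block_id : Int) (len_blocks : Int) (out : Bool) : Decidable (Spec_adj_checker grid row col adj block block_id len_blocks out) := by unfold Spec_adj_checker; infer_instance

-- ===== CLAIM (what is proved, stated in full; the proofs are below) =====
def Claim_equal_adj_checker : Prop := ∀ (grid : List (List Int)) (row : Int) (col : Int) (adj : List Int) (block : List (List Int)) (block_id : Int) (len_blocks : Int), Dom_adj_checker grid row col adj block block_id len_blocks → Pre_adj_checker grid row col adj block block_id len_blocks → Spec_adj_checker grid row col adj block block_id len_blocks (adj_checker grid row col adj block block_id len_blocks)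

-- ===== LEMMAS AND PROOFS =====

-- `if c then x else false` is `c && x` (A's `if block[i][j] == 1:` body)
theorem if_bool_eq_and (c x : Bool) : (if c = true then x else false) = (c && x) := by
  cases c <;> simp

-- a value of adj is never in inverted_adj (the first filter removed it)
theorem inv_contains_false (adj : List Int) (l : List Int) (bid : Int) (v : Int)
    (hv : adj.contains v = true) :
    ((l.filter (fun x => !(adj.contains x))).filter (fun x => decide (x ≤ bid))).contains v = false := by
  rw [Bool.eq_false_iff]
  intro hc
  have hm : v ∈ (l.filter (fun x => !(adj.contains x))).filter (fun x => decide (x ≤ bid)) := by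
    simpa using hc
  simp only [List.mem_filter] at hm
  have hnot : v ∉ adj := by simpa using hm.1.2
  exact hnot (by simpa using hv)

-- ===== VERDICT (by name: the statement is the Claim_ definition above) =====
theorem adj_checker_spec : Claim_equal_adj_checker := by
  intro grid row col adj block block_id len_blocks _ hpre
  obtain ⟨hrag, hreach⟩ := hpre
  simp only [List.all_eq_true, List.mem_range, Bool.or_eq_true, Bool.not_eq_true',
    decide_eq_true_eq] at hreach
  unfold Spec_adj_checker adj_checker adj_checker_alt
  dsimp only
  congr 1
  rw [Bool.eq_iff_iff]
  simp only [List.any_eq_true, List.mem_range, PySem.List.mem_enumerate_iff,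
    PySem.List.slice_to_natCast, if_bool_eq_and, Bool.and_eq_true, zero_add,
    decide_eq_true_eq]
  constructor
  · rintro ⟨i, hi, j, hj, hfill, d, hd, ⟨⟨⟨⟨h1, h2⟩, h3⟩, h4⟩, hadj⟩, -⟩
    simp only [PySem.List.pyGetD_natCast] at hfill
    have hreach' := hreach i hi j hj
    rcases hreach' with hf | hrd
    · rw [hfill] at hf; cases hf
    have hclt : col + (j : Int) + d.2 < ((grid.getD (row + (i : Int) + d.1).toNat []).length : Int) := by
      rcases hrd d hd with hng | hok
      · simp [h1, h2, h3] at hng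
        rw [← List.headD_eq_head?_getD] at hng
        omega
      · exact hok
    set r' : Int := row + (i : Int) + d.1 with hr'
    set c' : Int := col + (j : Int) + d.2 with hc'
    have hrN : r'.toNat < grid.length := by omega
    have hgetr : grid.getD r'.toNat [] = grid[r'.toNat] := List.getD_eq_getElem grid [] hrN
    rw [hgetr] at hclt
    have hcN : c'.toNat < (grid[r'.toNat]).length := by omega
    refine ⟨((r'.toNat : Int), grid[r'.toNat]), ⟨r'.toNat, hrN, rfl⟩,
      ((c'.toNat : Int), (List.take ((grid.headD []).length) grid[r'.toNat])[c'.toNat]'(by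
        simp only [List.length_take]; omega)), ⟨c'.toNat, (by simp only [List.length_take]; omega), rfl⟩, ?_, d, hd, ?_, ?_⟩
    · -- the forbidden-set membership
      have hv : (List.take ((grid.headD []).length) grid[r'.toNat])[c'.toNat]'(by
          simp only [List.length_take]; omega) = grid[r'.toNat][c'.toNat] := List.getElem_take
      have hval : PySem.List.pyGetD (PySem.List.pyGetD grid r' []) c' 0 = grid[r'.toNat][c'.toNat] := by
        rw [PySem.List.pyGetD_eq_getElem grid [] h1 (by exact_mod_cast h2),
          PySem.List.pyGetD_eq_getElem _ 0 h3 (by exact_mod_cast hclt)]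
      rw [hval] at hadj
      simp only [hv]
      simp [PySem.Set.contains]
      simpa using hadj
    · -- the bounds on the inverted indices
      refine ⟨by omega, by omega, by omega, by omega⟩
    · -- the block cell is filled
      have hidx1 : ((r'.toNat : Nat) : Int) - row - d.1 = (i : Int) := by omega
      have hidx2 : ((c'.toNat : Nat) : Int) - col - d.2 = (j : Int) := by omega
      rw [hidx1, hidx2]
      simp only [PySem.List.pyGetD_natCast]
      exact hfill
  · rintro ⟨x, ⟨r, hr, rfl⟩, x1, ⟨c, hc, rfl⟩, hcont, d, hd, ⟨hb1, hb2, hb3, hb4⟩, hblk⟩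
    simp only [List.length_take, lt_min_iff] at hc
    set i' : Int := (r : Int) - row - d.1 with hi'
    set j' : Int := (c : Int) - col - d.2 with hj'
    refine ⟨i'.toNat, by omega, j'.toNat, by omega, ?_, d, hd, ⟨⟨⟨⟨by omega, ?_⟩, by omega⟩, ?_⟩, ?_⟩, ?_⟩
    · -- filled block cell
      have h1 : ((i'.toNat : Nat) : Int) = i' := by omega
      have h2 : ((j'.toNat : Nat) : Int) = j' := by omega
      simp only [PySem.List.pyGetD_natCast]
      rw [← h1, ← h2] at hblk
      simpa only [PySem.List.pyGetD_natCast] using hblk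
    · omega
    · omega
    · -- grid value is in adj
      have hval : PySem.List.pyGetD (PySem.List.pyGetD grid (row + (i'.toNat : Int) + d.1) [])
          (col + (j'.toNat : Int) + d.2) 0 = grid[r][c]'hc.2 := by
        have e1 : row + (i'.toNat : Int) + d.1 = (r : Int) := by omega
        have e2 : col + (j'.toNat : Int) + d.2 = (c : Int) := by omega
        rw [e1, e2]
        simp only [PySem.List.pyGetD_natCast]
        rw [List.getD_eq_getElem grid [] hr, List.getD_eq_getElem _ 0 hc.2]
      rw [hval]
      have hv : (List.take ((grid.headD []).length) grid[r])[c]'(by simp only [List.length_take]; omega)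
          = grid[r][c]'hc.2 := List.getElem_take
      rw [hv] at hcont
      simp only [PySem.Set.contains] at hcont
      simpa using hcont
    · -- never in inverted_adj
      rw [Bool.not_eq_eq_eq_not, Bool.not_true]
      apply inv_contains_false
      have hval : PySem.List.pyGetD (PySem.List.pyGetD grid (row + (i'.toNat : Int) + d.1) [])
          (col + (j'.toNat : Int) + d.2) 0 = grid[r][c]'hc.2 := by
        have e1 : row + (i'.toNat : Int) + d.1 = (r : Int) := by omega
        have e2 : col + (j'.toNat : Int) + d.2 = (c : Int) := by omega
        rw [e1, e2]
        simp only [PySem.List.pyGetD_natCast]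
        rw [List.getD_eq_getElem grid [] hr, List.getD_eq_getElem _ 0 hc.2]
      rw [hval]
      have hv : (List.take ((grid.headD []).length) grid[r])[c]'(by simp only [List.length_take]; omega)
          = grid[r][c]'hc.2 := List.getElem_take
      rw [hv] at hcont
      simp only [PySem.Set.contains] at hcont
      simp only [List.contains_eq_mem, decide_eq_true_eq]
      simpa using hcont
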